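-- pv_equiv track=rewrite | github.com/DancingOnAir/LeetcodePythonSolution | Array/3143_maximum_points_inside_the_square.py | maxPointsInsideSquare1
-- ===== SOURCE A (Python) =====
-- from typing import List
--
-- def maxPointsInsideSquare1(points: List[List[int]], s: str) -> int:
--     m = []
--     for a, b in zip(points, s):
--         m.append([max(map(abs, a)), b])
--
--     res = 0
--     seen = set()
--     pre_radius = -1
--     cnt = 0
--     for a, b in sorted(m, key=lambda x: x[0]):
--         if b in seen:
--             if a != pre_radius:
--                 res += cnt
--             return res
--
--         if a == pre_radius:
--             cnt += 1
--         else: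
--             pre_radius = a
--             res += cnt
--             cnt = 1
--         seen.add(b)
--     return res + cnt
-- ===== SOURCE B (Python) =====
-- from typing import List
--
-- def maxPointsInsideSquare1(points: List[List[int]], s: str) -> int:
--     # Sort-free alternative: the admissible bound T is the minimum, over all
--     # pairs of equally-tagged points, of the larger of their two Chebyshev
--     # radii; the answer counts points with radius strictly below T.
--     rs = []
--     cs = []
--     for p, c in zip(points, s):
--         rs.append(max(map(abs, p)))
--         cs.append(c)
--     n = len(rs)
--     T = None
--     for i in range(n):
--         for j in range(i):
--             if cs[i] == cs[j]:
--                 v = max(rs[i], rs[j])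
--                 if T is None or v < T:
--                     T = v
--     if T is None:
--         return n
--     return sum(1 for r in rs if r < T)
-- ===== Notes on version B (the rewrite author's own statement) =====
-- stated objective: alternative
-- what changed: Replaces A's sort-by-radius plus stateful early-return scan (seen-set, previous-radius group counter) by a sort-free pairwise minimisation: T = min over all equally-tagged pairs of the larger of their two radii, then a separate pass counts points with radius strictly below T.
import Mathlib
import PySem

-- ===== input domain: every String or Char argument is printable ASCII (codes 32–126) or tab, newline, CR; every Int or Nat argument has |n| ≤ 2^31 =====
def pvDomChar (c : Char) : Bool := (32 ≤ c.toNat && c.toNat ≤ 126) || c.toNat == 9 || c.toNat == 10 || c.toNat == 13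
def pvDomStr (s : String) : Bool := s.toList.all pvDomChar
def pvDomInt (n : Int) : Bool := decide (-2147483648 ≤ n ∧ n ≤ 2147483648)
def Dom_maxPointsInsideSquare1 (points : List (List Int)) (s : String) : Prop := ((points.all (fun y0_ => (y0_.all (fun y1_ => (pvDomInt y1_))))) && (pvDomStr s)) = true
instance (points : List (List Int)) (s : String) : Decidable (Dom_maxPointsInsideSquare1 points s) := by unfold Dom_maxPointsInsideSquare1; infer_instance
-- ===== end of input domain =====

-- B replaces A's sort + stateful early-return scan by a sort-free pairwise minimisation over
-- equally-tagged pairs plus a counting pass (alternative algorithm, similar size, not faster).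


-- ===== PORT A =====
-- max(map(abs, p)); Python max raises on an empty list, Pre_ excludes that (.getD 0 is never reached
-- on admitted inputs).
def pvRadius (p : List Int) : Int := (PySem.List.max? (p.map (fun x => |x|)) (fun y => y)).getD 0

-- the 'for a, b in sorted(m, ...)' loop with its early returns; state (res, seen, pre_radius, cnt)
def pvALoop : List (Int × Char) → Int → PySem.Set Char → Int → Int → Int
  | [], res, _seen, _pre, cnt => res + cnt
  | (a, b) :: rest, res, seen, pre, cnt =>
    if PySem.Set.contains seen b then (if a ≠ pre then res + cnt else res)
    else
      let seen' := PySem.Set.add seen b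
      if a = pre then pvALoop rest res seen' pre (cnt + 1)
      else pvALoop rest (res + cnt) seen' a 1

def maxPointsInsideSquare1 (points : List (List Int)) (s : String) : Int :=
  let m := (points.zip s.toList).map (fun ab => (pvRadius ab.1, ab.2))
  pvALoop (PySem.List.sorted m (fun x => x.1) false) 0 PySem.Set.empty (-1) 0

-- ===== PORT B =====
-- the 'T = None; for i in range(n): for j in range(i): ...' double loop of B
def pvBLoop (rs : List Int) (cs : List Char) : Option Int :=
  (List.range rs.length).foldl (fun T i =>
    (List.range i).foldl (fun T j =>
      if cs.getD i ' ' = cs.getD j ' ' then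
        let v := max (rs.getD i 0) (rs.getD j 0)
        match T with
        | none => some v
        | some t => if v < t then some v else some t
      else T) T) none

def maxPointsInsideSquare1_alt (points : List (List Int)) (s : String) : Int :=
  let rs : List Int := (points.zip s.toList).map (fun pc => pvRadius pc.1)
  let cs : List Char := (points.zip s.toList).map (fun pc => pc.2)
  match pvBLoop rs cs with
  | none => (rs.length : Int)
  | some t => ((rs.filter (fun r => r < t)).length : Int)

-- ===== PRECONDITION & SPEC =====
-- Pre_ excludes exactly the inputs where Python A raises: max([]) (ValueError) on an empty point
-- among the zip-truncated prefix; B raises there too.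
def Pre_maxPointsInsideSquare1 (points : List (List Int)) (s : String) : Prop :=
  ∀ p ∈ points.take s.toList.length, p ≠ []
instance (points : List (List Int)) (s : String) : Decidable (Pre_maxPointsInsideSquare1 points s) := by unfold Pre_maxPointsInsideSquare1; infer_instance
def pvWitness_maxPointsInsideSquare1 : List (List Int) × String := ([[1, -2], [3]], "ab")

def Spec_maxPointsInsideSquare1 (points : List (List Int)) (s : String) (out : Int) : Prop := out = maxPointsInsideSquare1_alt points s
instance (points : List (List Int)) (s : String) (out : Int) : Decidable (Spec_maxPointsInsideSquare1 points s out) := by unfold Spec_maxPointsInsideSquare1; infer_instance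

-- ===== CLAIM (what is proved, stated in full; the proofs are below) =====
def Claim_equal_maxPointsInsideSquare1 : Prop := ∀ (points : List (List Int)) (s : String), Dom_maxPointsInsideSquare1 points s → Pre_maxPointsInsideSquare1 points s → Spec_maxPointsInsideSquare1 points s (maxPointsInsideSquare1 points s)

-- ===== LEMMAS AND PROOFS =====

def pvM (points : List (List Int)) (s : String) : List (Int × Char) :=
  (points.zip s.toList).map (fun ab => (pvRadius ab.1, ab.2))

def pvStep : Option Int → Int → Option Int :=
  fun T v => match T with | none => some v | some t => if v < t then some v else some t

def pvDflt : Int × Char := (0, ' ')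

def pvDV (m : List (Int × Char)) : List Int :=
  (List.range m.length).flatMap (fun i => (List.range i).filterMap (fun j =>
    if (m.getD i pvDflt).2 = (m.getD j pvDflt).2
    then some (max (m.getD i pvDflt).1 (m.getD j pvDflt).1) else none))

def pvHasDup (L : List (Int × Char)) : Prop :=
  ∃ p q : Int × Char, List.Subperm [p, q] L ∧ p.2 = q.2

def pvMinDup (L : List (Int × Char)) (t : Int) : Prop :=
  (∃ p q : Int × Char, List.Subperm [p, q] L ∧ p.2 = q.2 ∧ max p.1 q.1 = t) ∧
  (∀ p q : Int × Char, List.Subperm [p, q] L → p.2 = q.2 → t ≤ max p.1 q.1)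

theorem pvRadius_nonneg (p : List Int) : 0 ≤ pvRadius p := by
  unfold pvRadius
  cases h : PySem.List.max? (p.map (fun x => |x|)) (fun y => y) with
  | none => simp
  | some m =>
    have hm := PySem.List.max?_mem h
    simp only [List.mem_map] at hm
    obtain ⟨x, _, hx⟩ := hm
    simp [← hx, abs_nonneg]

theorem pvStep_some (t : Int) (xs : List Int) : xs.foldl pvStep (some t) = some (xs.foldl min t) := by
  induction xs generalizing t with
  | nil => rfl
  | cons x tl ih =>
    simp only [List.foldl_cons]
    have : pvStep (some t) x = some (min t x) := by
      simp only [pvStep]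
      split_ifs with h
      · rw [min_eq_right h.le]
      · rw [min_eq_left (by omega)]
    rw [this, ih]

theorem pvStep_min? (xs : List Int) : xs.foldl pvStep none = xs.min? := by
  cases xs with
  | nil => rfl
  | cons x tl =>
    simp only [List.foldl_cons]
    have h1 : pvStep none x = some x := rfl
    rw [h1, pvStep_some]
    rfl

theorem pvBLoop_eq (m : List (Int × Char)) :
    pvBLoop (m.map Prod.fst) (m.map Prod.snd) = (pvDV m).min? := by
  rw [← pvStep_min?]
  unfold pvBLoop pvDV
  rw [List.foldl_flatMap, List.length_map]
  apply PySem.List.foldl_congr_mem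
  intro T i hi
  rw [List.mem_range] at hi
  rw [List.foldl_filterMap]
  apply PySem.List.foldl_congr_mem
  intro T' j hj
  rw [List.mem_range] at hj
  have hgi : (m.map Prod.snd).getD i ' ' = (m.getD i pvDflt).2 := by
    rw [List.getD_eq_getElem _ _ (by simpa using hi), List.getD_eq_getElem _ _ hi]
    simp
  have hgj : (m.map Prod.snd).getD j ' ' = (m.getD j pvDflt).2 := by
    rw [List.getD_eq_getElem _ _ (by simpa using (hj.trans hi)), List.getD_eq_getElem _ _ (hj.trans hi)]
    simp
  have hfi : (m.map Prod.fst).getD i 0 = (m.getD i pvDflt).1 := by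
    rw [List.getD_eq_getElem _ _ (by simpa using hi), List.getD_eq_getElem _ _ hi]
    simp
  have hfj : (m.map Prod.fst).getD j 0 = (m.getD j pvDflt).1 := by
    rw [List.getD_eq_getElem _ _ (by simpa using (hj.trans hi)), List.getD_eq_getElem _ _ (hj.trans hi)]
    simp
  rw [hgi, hgj, hfi, hfj]
  split <;> simp [pvStep]

theorem pvB_eq (points : List (List Int)) (s : String) :
    maxPointsInsideSquare1_alt points s =
      (match (pvDV (pvM points s)).min? with
       | none => ((pvM points s).length : Int)
       | some t => ((pvM points s).countP (fun p => decide (p.1 < t)) : Int)) := by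
  have hrs : (points.zip s.toList).map (fun pc => pvRadius pc.1) = (pvM points s).map Prod.fst := by
    simp [pvM, List.map_map]
  have hcs : (points.zip s.toList).map (fun pc : List Int × Char => pc.2) = (pvM points s).map Prod.snd := by
    simp [pvM, List.map_map]
  show (match pvBLoop ((points.zip s.toList).map (fun pc : List Int × Char => pvRadius pc.1)) ((points.zip s.toList).map (fun pc : List Int × Char => pc.2)) with
        | none => (((points.zip s.toList).map (fun pc : List Int × Char => pvRadius pc.1)).length : Int)
        | some t => ((((points.zip s.toList).map (fun pc : List Int × Char => pvRadius pc.1)).filter (fun r => r < t)).length : Int)) = _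
  rw [hrs, hcs, pvBLoop_eq]
  cases h : (pvDV (pvM points s)).min? with
  | none => simp
  | some t => simp [List.countP_eq_length_filter, List.filter_map]; rfl

theorem pvPermPair {α : Type} {p q : α} {l : List α} (h : l.Perm [p, q]) :
    l = [p, q] ∨ l = [q, p] := by
  have hlen := h.length_eq
  match l, hlen with
  | [x, y], _ =>
    have hx : x = p ∨ x = q := by
      have : x ∈ [p, q] := h.mem_iff.mp (by simp)
      simpa using this
    rcases hx with rfl | rfl
    · left
      have : [y].Perm [q] := (List.perm_cons x).mp h
      simp [List.perm_singleton.mp this]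
    · right
      have h2 : [x, y].Perm [x, p] := h.trans (List.Perm.swap x p [])
      have : [y].Perm [p] := (List.perm_cons x).mp h2
      simp [List.perm_singleton.mp this]

theorem pvPairSublistOfIndices {α : Type} : ∀ (l : List α) (i j : Nat) (hij : i < j) (hj : j < l.length),
    List.Sublist [l[i]'(by omega), l[j]] l := by
  intro l
  induction l with
  | nil => intro i j hij hj; simp at hj
  | cons x tl ih =>
    intro i j hij hj
    match i, j, hij with
    | 0, j' + 1, _ =>
      simp only [List.getElem_cons_zero, List.getElem_cons_succ]
      exact List.Sublist.cons₂ x (List.singleton_sublist.mpr (List.getElem_mem _))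
    | i' + 1, j' + 1, h =>
      simp only [List.getElem_cons_succ]
      exact List.Sublist.cons x (ih i' j' (by omega) (by simpa using hj))

theorem pvIndicesOfPairSublist {α : Type} {p q : α} : ∀ {l : List α}, List.Sublist [p, q] l →
    ∃ i j, ∃ (hij : i < j) (hj : j < l.length), l[i]'(by omega) = p ∧ l[j] = q := by
  intro l
  induction l with
  | nil => intro h; simp at h
  | cons x tl ih =>
    intro h
    cases h with
    | cons _ h' =>
      obtain ⟨i, j, hij, hj, hp, hq⟩ := ih h'
      exact ⟨i + 1, j + 1, by omega, by simpa using hj, by simpa using hp, by simpa using hq⟩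
    | cons₂ _ h' =>
      have hq : q ∈ tl := by
        have := h'.subset; simp at this; exact this
      obtain ⟨j, hj, hget⟩ := List.getElem_of_mem hq
      exact ⟨0, j + 1, by omega, by simpa using hj, by simp, by simpa using hget⟩

theorem pvSubpermPairIff {α : Type} {p q : α} {L : List α} :
    List.Subperm [p, q] L ↔ List.Sublist [p, q] L ∨ List.Sublist [q, p] L := by
  constructor
  · rintro ⟨l', hp, hs⟩
    rcases pvPermPair hp with rfl | rfl
    · exact Or.inl hs
    · exact Or.inr hs
  · rintro (hs | hs)
    · exact hs.subperm
    · exact ⟨[q, p], List.Perm.swap p q [], hs⟩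

theorem pvDV_mem (m : List (Int × Char)) (v : Int) :
    v ∈ pvDV m ↔ ∃ i j, j < i ∧ i < m.length ∧ (m.getD i pvDflt).2 = (m.getD j pvDflt).2 ∧
      max (m.getD i pvDflt).1 (m.getD j pvDflt).1 = v := by
  unfold pvDV
  simp only [List.mem_flatMap, List.mem_filterMap, List.mem_range, Option.ite_none_right_eq_some,
    Option.some.injEq]
  constructor
  · rintro ⟨i, hi, j, hj, hc, hv⟩; exact ⟨i, j, hj, hi, hc, hv⟩
  · rintro ⟨i, j, hj, hi, hc, hv⟩; exact ⟨i, hi, j, hj, hc, hv⟩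

theorem pvDV_mem_of_subperm {m : List (Int × Char)} {p q : Int × Char}
    (hs : List.Subperm [p, q] m) (hc : p.2 = q.2) : max p.1 q.1 ∈ pvDV m := by
  rcases pvSubpermPairIff.mp hs with h | h
  · obtain ⟨i, j, hij, hj, hp, hq⟩ := pvIndicesOfPairSublist h
    rw [pvDV_mem]
    refine ⟨j, i, hij, hj, ?_, ?_⟩
    · rw [List.getD_eq_getElem _ _ hj, List.getD_eq_getElem _ _ (by omega), hp, hq]
      exact hc.symm
    · rw [List.getD_eq_getElem _ _ hj, List.getD_eq_getElem _ _ (by omega), hp, hq]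
      exact max_comm q.1 p.1
  · obtain ⟨i, j, hij, hj, hp, hq⟩ := pvIndicesOfPairSublist h
    rw [pvDV_mem]
    refine ⟨j, i, hij, hj, ?_, ?_⟩
    · rw [List.getD_eq_getElem _ _ hj, List.getD_eq_getElem _ _ (by omega), hp, hq]
      exact hc
    · rw [List.getD_eq_getElem _ _ hj, List.getD_eq_getElem _ _ (by omega), hp, hq]

theorem pvSubperm_of_dv_mem {m : List (Int × Char)} {v : Int} (h : v ∈ pvDV m) :
    ∃ p q : Int × Char, List.Subperm [p, q] m ∧ p.2 = q.2 ∧ max p.1 q.1 = v := by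
  rw [pvDV_mem] at h
  obtain ⟨i, j, hji, hi, hc, hv⟩ := h
  refine ⟨m[j]'(by omega), m[i]'hi, (pvPairSublistOfIndices m j i hji hi).subperm, ?_, ?_⟩
  · rw [List.getD_eq_getElem _ _ hi, List.getD_eq_getElem _ _ (by omega)] at hc
    exact hc.symm
  · rw [List.getD_eq_getElem _ _ hi, List.getD_eq_getElem _ _ (by omega)] at hv
    rw [max_comm]
    exact hv

theorem pvDV_none {m : List (Int × Char)} (h : (pvDV m).min? = none) : ¬ pvHasDup m := by
  rintro ⟨p, q, hs, hc⟩
  have := pvDV_mem_of_subperm hs hc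
  rw [List.min?_eq_none_iff] at h
  simp [h] at this

theorem pvDV_some {m : List (Int × Char)} {t : Int} (h : (pvDV m).min? = some t) : pvMinDup m t := by
  rw [List.min?_eq_some_iff] at h
  obtain ⟨hmem, hle⟩ := h
  constructor
  · exact pvSubperm_of_dv_mem hmem
  · intro p q hs hc
    exact hle _ (pvDV_mem_of_subperm hs hc)

theorem pvHasDup_perm {L L' : List (Int × Char)} (h : L.Perm L') : pvHasDup L ↔ pvHasDup L' := by
  unfold pvHasDup
  constructor <;> rintro ⟨p, q, hs, hc⟩
  · exact ⟨p, q, (List.Perm.subperm_left h).mp hs, hc⟩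
  · exact ⟨p, q, (List.Perm.subperm_left h).mpr hs, hc⟩

theorem pvMinDup_perm {L L' : List (Int × Char)} (h : L.Perm L') (t : Int) :
    pvMinDup L t ↔ pvMinDup L' t := by
  unfold pvMinDup
  constructor <;> rintro ⟨⟨p, q, hs, hc, hm⟩, hmin⟩
  · exact ⟨⟨p, q, (List.Perm.subperm_left h).mp hs, hc, hm⟩,
      fun p q hs hc => hmin p q ((List.Perm.subperm_left h).mpr hs) hc⟩
  · exact ⟨⟨p, q, (List.Perm.subperm_left h).mpr hs, hc, hm⟩,
      fun p q hs hc => hmin p q ((List.Perm.subperm_left h).mp hs) hc⟩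

theorem pvNotHasDup_of_nodup {L : List (Int × Char)} (h : (L.map Prod.snd).Nodup) :
    ¬ pvHasDup L := by
  rintro ⟨p, q, hs, hc⟩
  have key : ∀ (x y : Int × Char), List.Sublist [x, y] L → x.2 ≠ y.2 := by
    intro x y hxy
    obtain ⟨i, j, hij, hj, hx, hy⟩ := pvIndicesOfPairSublist hxy
    intro hcc
    have : (L.map Prod.snd)[i]'(by simpa using (by omega : i < L.length)) =
        (L.map Prod.snd)[j]'(by simpa using hj) := by
      simp only [List.getElem_map]
      rw [hx, hy]; exact hcc
    have := (List.Nodup.getElem_inj_iff h).mp this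
    omega
  rcases pvSubpermPairIff.mp hs with hsub | hsub
  · exact key _ _ hsub hc
  · exact key _ _ hsub hc.symm

theorem pvCount_full {pref : List (Int × Char)} {pre : Int} (h : ∀ p ∈ pref, p.1 ≤ pre) :
    pref.countP (fun p => decide (p.1 < pre)) + pref.countP (fun p => decide (p.1 = pre)) = pref.length := by
  rw [List.length_eq_countP_add_countP (fun p => decide (p.1 < pre))]
  congr 1
  apply List.countP_congr
  intro x hx
  have := h x hx
  simp only [decide_eq_true_eq, decide_not]
  constructor
  · intro hh; simp at hh ⊢; omega
  · intro hh; simp at hh ⊢; omega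

theorem pvALoop_spec : ∀ (u pref : List (Int × Char)) (res : Int) (seen : PySem.Set Char) (pre cnt : Int),
    List.Pairwise (fun p q : Int × Char => p.1 ≤ q.1) (pref ++ u) →
    (∀ p ∈ pref ++ u, 0 ≤ p.1) →
    (pref.map Prod.snd).Nodup →
    (∀ c : Char, PySem.Set.contains seen c = true ↔ c ∈ pref.map Prod.snd) →
    cnt = (pref.countP (fun p => decide (p.1 = pre)) : Int) →
    res = (pref.countP (fun p => decide (p.1 < pre)) : Int) →
    (∀ p ∈ pref, p.1 ≤ pre) →
    (pre ∈ pref.map Prod.fst ∨ (pref = [] ∧ pre = -1)) →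
    (¬ pvHasDup (pref ++ u) → pvALoop u res seen pre cnt = ((pref ++ u).length : Int)) ∧
    (∀ t, pvMinDup (pref ++ u) t → pvALoop u res seen pre cnt = ((pref ++ u).countP (fun p => decide (p.1 < t)) : Int)) := by
  intro u
  induction u with
  | nil =>
    intro pref res seen pre cnt hpair hnn hnodup hseen hcnt hres hle hmem
    simp only [List.append_nil] at *
    constructor
    · intro _
      show res + cnt = _
      rw [hres, hcnt, ← Nat.cast_add, pvCount_full hle]
    · intro t hmd
      exact absurd ⟨_, _, hmd.1.choose_spec.choose_spec.1, hmd.1.choose_spec.choose_spec.2.1⟩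
        (pvNotHasDup_of_nodup hnodup)
  | cons hd u' ih =>
    intro pref res seen pre cnt hpair hnn hnodup hseen hcnt hres hle hmem
    obtain ⟨a, b⟩ := hd
    -- facts from sortedness
    have hcross : ∀ p ∈ pref, ∀ q ∈ (a, b) :: u', p.1 ≤ q.1 := (List.pairwise_append.mp hpair).2.2
    have hsuf : List.Pairwise (fun p q : Int × Char => p.1 ≤ q.1) ((a, b) :: u') :=
      (List.pairwise_append.mp hpair).2.1
    have hu' : ∀ q ∈ u', a ≤ q.1 := by
      have := List.pairwise_cons.mp hsuf
      exact fun q hq => this.1 q hq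
    have hpref_le : ∀ p ∈ pref, p.1 ≤ a := fun p hp => hcross p hp (a, b) (by simp)
    have ha_nn : (0:Int) ≤ a := hnn (a, b) (by simp)
    have hpre_le_a : pre ≤ a := by
      rcases hmem with hin | ⟨rfl, rfl⟩
      · obtain ⟨p, hp, hpe⟩ := List.mem_map.mp hin
        rw [← hpe]; exact hpref_le p hp
      · omega
    by_cases hb : PySem.Set.contains seen b = true
    · -- duplicate tag found: Python returns here
      obtain ⟨p, hp, hpb⟩ := List.mem_map.mp ((hseen b).mp hb)
      have hsub : List.Sublist [p, (a, b)] (pref ++ (a, b) :: u') :=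
        List.Sublist.append (List.singleton_sublist.mpr hp)
          (List.Sublist.cons₂ (a, b) (List.nil_sublist u'))
      have hsp : List.Subperm [p, (a, b)] (pref ++ (a, b) :: u') := hsub.subperm
      have hmax : max p.1 a = a := max_eq_right ((hle p hp).trans hpre_le_a)
      have hIndexMin : ∀ i j (hij : i < j) (hj : j < (pref ++ (a, b) :: u').length),
          ((pref ++ (a, b) :: u')[i]'(by omega)).2 = ((pref ++ (a, b) :: u')[j]'hj).2 →
          a ≤ max (((pref ++ (a, b) :: u')[i]'(by omega)).1) (((pref ++ (a, b) :: u')[j]'hj).1) := by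
        intro i j hij hj hcc
        by_cases hjp : j < pref.length
        · exfalso
          have hi' : i < pref.length := by omega
          rw [List.getElem_append_left hi', List.getElem_append_left hjp] at hcc
          have : (pref.map Prod.snd)[i]'(by simpa using hi') = (pref.map Prod.snd)[j]'(by simpa using hjp) := by
            simpa using hcc
          have := (List.Nodup.getElem_inj_iff hnodup).mp this
          omega
        · have hjm : (pref ++ (a, b) :: u')[j]'hj ∈ (a, b) :: u' := by
            rw [List.getElem_append_right (by omega)]
            exact List.getElem_mem _
          have : a ≤ ((pref ++ (a, b) :: u')[j]'hj).1 := by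
            rcases (List.mem_cons.mp hjm) with he | hm
            · rw [he]
            · exact hu' _ hm
          exact this.trans (le_max_right _ _)
      have hminA : pvMinDup (pref ++ (a, b) :: u') a := by
        constructor
        · exact ⟨p, (a, b), hsp, by simpa using hpb, by simpa using hmax⟩
        · intro p' q' hs' hc'
          rcases pvSubpermPairIff.mp hs' with hsub' | hsub'
          · obtain ⟨i, j, hij, hj, hx, hy⟩ := pvIndicesOfPairSublist hsub'
            have := hIndexMin i j hij hj (by rw [hx, hy]; exact hc')
            rwa [hx, hy] at this
          · obtain ⟨i, j, hij, hj, hx, hy⟩ := pvIndicesOfPairSublist hsub'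
            have := hIndexMin i j hij hj (by rw [hx, hy]; exact hc'.symm)
            rw [hx, hy] at this
            rwa [max_comm] at this
      have hloop : pvALoop ((a, b) :: u') res seen pre cnt = if a ≠ pre then res + cnt else res := by
        simp only [pvALoop, hb, if_true]
      constructor
      · intro hnd
        exact absurd ⟨p, (a, b), hsp, by simpa using hpb⟩ hnd
      · intro t hmd
        have hta : t = a := by
          have h1 : t ≤ a := by
            have := hmd.2 p (a, b) hsp (by simpa using hpb)
            simpa [hmax] using this
          have h2 : a ≤ t := by
            obtain ⟨p', q', hs', hc', hm'⟩ := hmd.1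
            have := hminA.2 p' q' hs' hc'
            omega
          omega
        rw [hta] at hmd ⊢
        rw [hloop]
        have hcsuf : ((a, b) :: u').countP (fun p => decide (p.1 < a)) = 0 := by
          rw [List.countP_eq_zero]
          intro q hq
          rcases List.mem_cons.mp hq with he | hm
          · simp [he]
          · simpa using not_lt.mpr (hu' q hm)
        rw [List.countP_append, hcsuf, Nat.add_zero]
        by_cases hat : a = pre
        · subst hat
          simp only [ne_eq, not_true_eq_false, if_false]
          exact hres
        · have hlt : pre < a := lt_of_le_of_ne hpre_le_a (by omega)
          have hfull : pref.countP (fun p => decide (p.1 < a)) = pref.length := by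
            rw [List.countP_eq_length]
            intro q hq
            have := hle q hq
            simp; omega
          rw [hfull]
          have : res + cnt = (pref.length : Int) := by
            rw [hres, hcnt, ← Nat.cast_add, pvCount_full hle]
          simp only [ne_eq, hat, not_false_eq_true, if_true]
          omega
    · -- new tag: Python keeps scanning
      have hbn : b ∉ pref.map Prod.snd := fun hmem' => hb ((hseen b).mpr hmem')
      have hbm : b ∉ seen := by
        intro hmm
        exact hb ((PySem.Set.contains_iff seen b).mpr hmm)
      have hLrw : (pref ++ [(a, b)]) ++ u' = pref ++ (a, b) :: u' := by simp
      have hseen' : ∀ c : Char, PySem.Set.contains (PySem.Set.add seen b) c = true ↔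
          c ∈ (pref ++ [(a, b)]).map Prod.snd := by
        intro c
        rw [PySem.Set.contains_iff, PySem.Set.mem_add]
        simp only [List.map_append, List.mem_append, List.map_cons, List.map_nil,
          List.mem_singleton]
        rw [← hseen c, PySem.Set.contains_iff]
      have hnodup' : ((pref ++ [(a, b)]).map Prod.snd).Nodup := by
        simp only [List.map_append, List.map_cons, List.map_nil]
        rw [List.nodup_append]
        refine ⟨hnodup, List.nodup_singleton b, ?_⟩
        intro c hc1 d hd
        have hdb : d = b := by simpa using hd
        subst hdb
        exact fun hcb => hbn (hcb ▸ hc1)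
      by_cases hap : a = pre
      · have hstep : pvALoop ((a, b) :: u') res seen pre cnt =
            pvALoop u' res (PySem.Set.add seen b) pre (cnt + 1) := by
          simp [pvALoop, hbm, hap]
        rw [hstep]
        have := ih (pref ++ [(a, b)]) res (PySem.Set.add seen b) pre (cnt + 1)
          (by rw [hLrw]; exact hpair) (by rw [hLrw]; exact hnn) hnodup' hseen'
          (by subst hap; rw [hcnt]; simp [List.countP_append])
          (by subst hap; rw [hres]; simp [List.countP_append])
          (by intro q hq; rcases List.mem_append.mp hq with h1 | h2
              · exact hle q h1
              · simp at h2; rw [h2]; omega)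
          (by left; simp [hap])
        rw [hLrw] at this
        exact this
      · have hlt : pre < a := lt_of_le_of_ne hpre_le_a (fun h => hap h.symm)
        have hstep : pvALoop ((a, b) :: u') res seen pre cnt =
            pvALoop u' (res + cnt) (PySem.Set.add seen b) a 1 := by
          simp [pvALoop, hbm, hap]
        rw [hstep]
        have hc1 : (1 : Int) = ((pref ++ [(a, b)]).countP (fun p => decide (p.1 = a)) : Int) := by
          have h0 : pref.countP (fun p => decide (p.1 = a)) = 0 := by
            rw [List.countP_eq_zero]
            intro q hq
            have := hle q hq
            simp; omega
          simp [List.countP_append, h0]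
        have hr1 : res + cnt = ((pref ++ [(a, b)]).countP (fun p => decide (p.1 < a)) : Int) := by
          have hfull : pref.countP (fun p => decide (p.1 < a)) = pref.length := by
            rw [List.countP_eq_length]
            intro q hq
            have := hle q hq
            simp; omega
          have : res + cnt = (pref.length : Int) := by
            rw [hres, hcnt, ← Nat.cast_add, pvCount_full hle]
          simp [List.countP_append, hfull, this]
        have := ih (pref ++ [(a, b)]) (res + cnt) (PySem.Set.add seen b) a 1
          (by rw [hLrw]; exact hpair) (by rw [hLrw]; exact hnn) hnodup' hseen'
          hc1 hr1
          (by intro q hq; rcases List.mem_append.mp hq with h1 | h2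
              · exact (hle q h1).trans hpre_le_a
              · simp at h2; rw [h2])
          (by left; simp)
        rw [hLrw] at this
        exact this

theorem pvAB_eq (points : List (List Int)) (s : String) :
    maxPointsInsideSquare1 points s = maxPointsInsideSquare1_alt points s := by
  rw [pvB_eq]
  show pvALoop (PySem.List.sorted (pvM points s) (fun x => x.1) false) 0 PySem.Set.empty (-1) 0 = _
  have hperm : (PySem.List.sorted (pvM points s) (fun x : Int × Char => x.1) false).Perm (pvM points s) :=
    PySem.List.sorted_perm (pvM points s) _ false
  have hpair : List.Pairwise (fun p q : Int × Char => p.1 ≤ q.1)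
      ([] ++ PySem.List.sorted (pvM points s) (fun x : Int × Char => x.1) false) := by
    simpa using PySem.List.sorted_pairwise (pvM points s) (fun x : Int × Char => x.1)
  have hnn : ∀ p ∈ [] ++ PySem.List.sorted (pvM points s) (fun x : Int × Char => x.1) false, (0:Int) ≤ p.1 := by
    intro p hp
    simp only [List.nil_append] at hp
    have hm : p ∈ pvM points s := (PySem.List.mem_sorted (pvM points s) _ false p).mp hp
    obtain ⟨ab, _, rfl⟩ := List.mem_map.mp hm
    exact pvRadius_nonneg _
  have H := pvALoop_spec (PySem.List.sorted (pvM points s) (fun x : Int × Char => x.1) false)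
      [] 0 PySem.Set.empty (-1) 0 hpair hnn (by simp)
      (by intro c; constructor
          · intro hc
            exact absurd ((PySem.Set.contains_iff PySem.Set.empty c).mp hc) (by simp [PySem.Set.empty])
          · intro hc; simp at hc)
      (by simp) (by simp) (by simp) (Or.inr ⟨rfl, rfl⟩)
  simp only [List.nil_append] at H
  cases h : (pvDV (pvM points s)).min? with
  | none =>
    have hnd : ¬ pvHasDup (PySem.List.sorted (pvM points s) (fun x : Int × Char => x.1) false) := by
      rw [pvHasDup_perm hperm]
      exact pvDV_none h
    rw [H.1 hnd, hperm.length_eq]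
  | some t =>
    have hmd : pvMinDup (PySem.List.sorted (pvM points s) (fun x : Int × Char => x.1) false) t :=
      (pvMinDup_perm hperm t).mpr (pvDV_some h)
    rw [H.2 t hmd, hperm.countP_eq]

-- ===== VERDICT (by name: the statement is the Claim_ definition above) =====
theorem maxPointsInsideSquare1_spec : Claim_equal_maxPointsInsideSquare1 := by
  intro points s _ _
  exact pvAB_eq points s
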